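-- pv_equiv track=rewrite | github.com/gisul-git/Aptor | services/data-engineering-service/app/services/question_generator.py | _validate_data_variety
-- ===== SOURCE A (Python) =====
-- from typing import Optional, Dict, Any, List
--
-- def _validate_data_variety(sample_data: List[Dict], input_schema: Dict[str, str]) -> List[str]:
--     """Validate that sample data has sufficient variety for meaningful testing."""
--     issues = []
--
--     if len(sample_data) < 3:
--         return issues  # Not enough data to check variety
--
--     # Check for duplicate rows
--     unique_rows = set()
--     for row in sample_data:
--         row_tuple = tuple(sorted(row.items()))
--         if row_tuple in unique_rows:
--             issues.append("Sample data contains duplicate rows - should have variety")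
--             break
--         unique_rows.add(row_tuple)
--
--     # Check for variety in key columns
--     for col, dtype in input_schema.items():
--         values = [row.get(col) for row in sample_data if col in row]
--         unique_values = set(values)
--
--         if len(unique_values) == 1 and len(values) > 2:
--             issues.append(f"Column '{col}' has no variety in sample data - all values are the same")
--         elif dtype.lower() in ["string"] and len(unique_values) < min(3, len(values)):
--             issues.append(f"String column '{col}' should have more variety in sample data")
--
--     return issues
-- ===== SOURCE B (Python) =====
-- from typing import Optional, Dict, Any, List
--
-- def _validate_data_variety(sample_data: List[Dict], input_schema: Dict[str, str]) -> List[str]: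
--     """Validate that sample data has sufficient variety for meaningful testing."""
--     if len(sample_data) < 3:
--         return []
--
--     # Duplicate-row detection (set of sorted item tuples, early stop).
--     duplicate = False
--     seen = set()
--     for row in sample_data:
--         key = tuple(sorted(row.items()))
--         if key in seen:
--             duplicate = True
--             break
--         seen.add(key)
--
--     # One row-major pass: per schema column, a running set of its values
--     # and a count of rows in which it is present.
--     stats = {}
--     for row in sample_data:
--         for col in input_schema:
--             if col in row:
--                 vals, cnt = stats.get(col, (set(), 0))
--                 vals.add(row.get(col))
--                 stats[col] = (vals, cnt + 1)
--
--     issues = ["Sample data contains duplicate rows - should have variety"] if duplicate else []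
--
--     # Schema pass: emit the variety messages from the accumulated stats.
--     for col, dtype in input_schema.items():
--         vals, cnt = stats.get(col, (set(), 0))
--         if len(vals) == 1 and cnt > 2:
--             issues.append(f"Column '{col}' has no variety in sample data - all values are the same")
--         elif dtype.lower() in ["string"] and len(vals) < min(3, cnt):
--             issues.append(f"String column '{col}' should have more variety in sample data")
--
--     return issues
-- ===== Notes on version B (the rewrite author's own statement) =====
-- stated objective: alternative
-- what changed: Replaces A's per-column rescans of the full row list with a single row-major pass that accumulates, per schema column, a running value-set and a present-count in a dict, followed by one schema pass emitting the messages from those stats; duplicate-row detection is kept.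
import Mathlib
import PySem

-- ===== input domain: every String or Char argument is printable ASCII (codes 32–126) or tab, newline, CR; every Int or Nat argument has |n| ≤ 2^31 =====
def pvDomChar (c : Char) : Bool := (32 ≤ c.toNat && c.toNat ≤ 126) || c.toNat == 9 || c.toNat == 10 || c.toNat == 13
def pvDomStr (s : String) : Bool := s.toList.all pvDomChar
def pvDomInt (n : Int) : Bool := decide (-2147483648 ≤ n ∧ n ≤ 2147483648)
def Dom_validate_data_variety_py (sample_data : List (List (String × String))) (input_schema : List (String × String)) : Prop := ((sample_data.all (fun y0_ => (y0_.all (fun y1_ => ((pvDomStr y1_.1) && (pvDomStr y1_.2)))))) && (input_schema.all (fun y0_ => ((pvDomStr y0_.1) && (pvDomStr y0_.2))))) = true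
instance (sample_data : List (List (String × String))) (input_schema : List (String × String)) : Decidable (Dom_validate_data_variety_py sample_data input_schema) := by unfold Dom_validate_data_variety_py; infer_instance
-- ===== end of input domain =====

-- B replaces A's per-column rescans with one row-major pass accumulating per-column
-- (value-set, present-count) stats in a dict, then a schema pass emitting the messages.

def pvDupMsg : String := "Sample data contains duplicate rows - should have variety"
def pvNoVarietyMsg (col : String) : String :=
  "Column '" ++ col ++ "' has no variety in sample data - all values are the same"
def pvMoreVarietyMsg (col : String) : String :=
  "String column '" ++ col ++ "' should have more variety in sample data"

-- ===== PORT A =====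
def validate_data_variety_py (sample_data : List (List (String × String))) (input_schema : List (String × String)) : List String :=
  let issues : List String := []
  if sample_data.length < 3 then issues else
  -- duplicate-row loop: state (issues, unique_rows, broken)
  let st := sample_data.foldl
    (fun (st : List String × PySem.Set (List (String × String)) × Bool) row =>
      if st.2.2 then st else
      let row_tuple := PySem.List.sorted2 row (fun p => p.1) (fun p => p.2)
      if PySem.Set.contains st.2.1 row_tuple then (st.1 ++ [pvDupMsg], st.2.1, true)
      else (st.1, PySem.Set.add st.2.1 row_tuple, false))
    (issues, PySem.Set.empty, false)
  -- per-column variety loop: rescans sample_data for each schema entry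
  input_schema.foldl
    (fun iss p =>
      let values := (sample_data.filter (fun row => (PySem.Dict.mk row).contains p.1)).map
        (fun row => (PySem.Dict.mk row).get? p.1)
      let unique_values := PySem.Set.ofList values
      if unique_values.length = 1 ∧ values.length > 2 then iss ++ [pvNoVarietyMsg p.1]
      else if PySem.Str.lower p.2 = "string" ∧ unique_values.length < min 3 values.length then
        iss ++ [pvMoreVarietyMsg p.1]
      else iss)
    st.1

-- ===== PORT B =====
-- one row-major pass: per schema column, a running value-set and a present-count
def pvAltStats (sample_data : List (List (String × String))) (input_schema : List (String × String)) :
    PySem.Dict String (PySem.Set (Option String) × Nat) :=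
  sample_data.foldl
    (fun d row =>
      input_schema.foldl
        (fun d p =>
          if (PySem.Dict.mk row).contains p.1 then
            let s := d.getD p.1 (PySem.Set.empty, 0)
            d.insert p.1 (PySem.Set.add s.1 ((PySem.Dict.mk row).get? p.1), s.2 + 1)
          else d)
        d)
    PySem.Dict.empty

def validate_data_variety_py_alt (sample_data : List (List (String × String))) (input_schema : List (String × String)) : List String :=
  if sample_data.length < 3 then [] else
  -- duplicate-row detection, early stop
  let dup := (sample_data.foldl
    (fun (st : PySem.Set (List (String × String)) × Bool) row =>
      if st.2 then st else
      let key := PySem.List.sorted2 row (fun p => p.1) (fun p => p.2)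
      if PySem.Set.contains st.1 key then (st.1, true)
      else (PySem.Set.add st.1 key, false))
    (PySem.Set.empty, false)).2
  let stats := pvAltStats sample_data input_schema
  let issues := if dup then [pvDupMsg] else []
  -- schema pass over the accumulated stats
  input_schema.foldl
    (fun iss p =>
      let s := stats.getD p.1 (PySem.Set.empty, 0)
      if s.1.length = 1 ∧ s.2 > 2 then iss ++ [pvNoVarietyMsg p.1]
      else if PySem.Str.lower p.2 = "string" ∧ s.1.length < min 3 s.2 then
        iss ++ [pvMoreVarietyMsg p.1]
      else iss)
    issues

-- ===== PRECONDITION & SPEC =====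
-- Pre_ excludes assoc lists with duplicate keys (in a row or in the schema): a Python dict
-- cannot hold duplicate keys, so those inputs are unreachable representation corners on which
-- first-match dict semantics are accidental.
def Pre_validate_data_variety_py (sample_data : List (List (String × String))) (input_schema : List (String × String)) : Prop :=
  (input_schema.map Prod.fst).Nodup ∧ ∀ row ∈ sample_data, (row.map Prod.fst).Nodup
instance (sample_data : List (List (String × String))) (input_schema : List (String × String)) : Decidable (Pre_validate_data_variety_py sample_data input_schema) := by unfold Pre_validate_data_variety_py; infer_instance

def pvWitness_validate_data_variety_py : (List (List (String × String))) × (List (String × String)) :=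
  ([[("a", "x")], [("a", "y")], [("a", "z")]], [("a", "int")])

def Spec_validate_data_variety_py (sample_data : List (List (String × String))) (input_schema : List (String × String)) (out : List String) : Prop := out = validate_data_variety_py_alt sample_data input_schema
instance (sample_data : List (List (String × String))) (input_schema : List (String × String)) (out : List String) : Decidable (Spec_validate_data_variety_py sample_data input_schema out) := by unfold Spec_validate_data_variety_py; infer_instance

-- ===== CLAIM (what is proved, stated in full; the proofs are below) =====
def Claim_equal_validate_data_variety_py : Prop := ∀ (sample_data : List (List (String × String))) (input_schema : List (String × String)), Dom_validate_data_variety_py sample_data input_schema → Pre_validate_data_variety_py sample_data input_schema → Spec_validate_data_variety_py sample_data input_schema (validate_data_variety_py sample_data input_schema)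

-- ===== LEMMAS AND PROOFS =====

theorem pv_dup_rel (rows : List (List (String × String)))
    (u : PySem.Set (List (String × String))) (b : Bool) (iss0 : List String) :
    rows.foldl
      (fun (st : List String × PySem.Set (List (String × String)) × Bool) row =>
        if st.2.2 then st else
        let row_tuple := PySem.List.sorted2 row (fun p => p.1) (fun p => p.2)
        if PySem.Set.contains st.2.1 row_tuple then (st.1 ++ [pvDupMsg], st.2.1, true)
        else (st.1, PySem.Set.add st.2.1 row_tuple, false))
      ((if b then iss0 ++ [pvDupMsg] else iss0), u, b)
    = ((if (rows.foldl
          (fun (st : PySem.Set (List (String × String)) × Bool) row =>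
            if st.2 then st else
            let key := PySem.List.sorted2 row (fun p => p.1) (fun p => p.2)
            if PySem.Set.contains st.1 key then (st.1, true)
            else (PySem.Set.add st.1 key, false)) (u, b)).2 then iss0 ++ [pvDupMsg] else iss0),
       (rows.foldl
          (fun (st : PySem.Set (List (String × String)) × Bool) row =>
            if st.2 then st else
            let key := PySem.List.sorted2 row (fun p => p.1) (fun p => p.2)
            if PySem.Set.contains st.1 key then (st.1, true)
            else (PySem.Set.add st.1 key, false)) (u, b)).1,
       (rows.foldl
          (fun (st : PySem.Set (List (String × String)) × Bool) row =>
            if st.2 then st else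
            let key := PySem.List.sorted2 row (fun p => p.1) (fun p => p.2)
            if PySem.Set.contains st.1 key then (st.1, true)
            else (PySem.Set.add st.1 key, false)) (u, b)).2) := by
  induction rows generalizing u b with
  | nil => simp
  | cons r t ih =>
    simp only [List.foldl_cons]
    by_cases hb : b
    · subst hb; simpa using ih u true
    · simp only [Bool.not_eq_true] at hb; subst hb
      by_cases hc : PySem.List.sorted2 r (fun p => p.1) (fun p => p.2) ∈ u
      · simpa [hc, PySem.Set.contains] using ih u true
      · simpa [hc, PySem.Set.contains] using ih (PySem.Set.add u (PySem.List.sorted2 r (fun p => p.1) (fun p => p.2))) false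

theorem pv_stats_inner (row : List (String × String)) (schema : List (String × String))
    (hnd : (schema.map Prod.fst).Nodup)
    (d : PySem.Dict String (PySem.Set (Option String) × Nat)) (c : String) :
    (schema.foldl
      (fun d p =>
        if (PySem.Dict.mk row).contains p.1 then
          let s := d.getD p.1 (PySem.Set.empty, 0)
          d.insert p.1 (PySem.Set.add s.1 ((PySem.Dict.mk row).get? p.1), s.2 + 1)
        else d) d).getD c (PySem.Set.empty, 0)
    = if c ∈ schema.map Prod.fst ∧ (PySem.Dict.mk row).contains c then
        (PySem.Set.add (d.getD c (PySem.Set.empty, 0)).1 ((PySem.Dict.mk row).get? c),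
         (d.getD c (PySem.Set.empty, 0)).2 + 1)
      else d.getD c (PySem.Set.empty, 0) := by
  induction schema generalizing d with
  | nil => simp
  | cons p t ih =>
    simp only [List.map_cons, List.nodup_cons] at hnd
    obtain ⟨hp, hndt⟩ := hnd
    simp only [List.foldl_cons]
    by_cases hr : (PySem.Dict.mk row).contains p.1 = true
    · rw [if_pos hr, ih hndt]
      by_cases hcp : c = p.1
      · subst hcp
        rw [if_neg (fun h => hp h.1), PySem.Dict.getD_insert, if_pos rfl,
          if_pos ⟨by simp, hr⟩]
      · rw [PySem.Dict.getD_insert, if_neg hcp]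
        simp only [List.map_cons, List.mem_cons, hcp, false_or]
    · rw [if_neg hr, ih hndt]
      by_cases hcp : c = p.1
      · subst hcp
        rw [if_neg (fun h => hp h.1), if_neg (by simp only [Bool.not_eq_true] at hr; simp [hr])]
      · simp only [List.map_cons, List.mem_cons, hcp, false_or]

theorem pv_stats_outer (rows : List (List (String × String))) (schema : List (String × String))
    (hnd : (schema.map Prod.fst).Nodup)
    (d : PySem.Dict String (PySem.Set (Option String) × Nat)) (c : String) :
    (rows.foldl
      (fun d row =>
        schema.foldl
          (fun d p =>
            if (PySem.Dict.mk row).contains p.1 then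
              let s := d.getD p.1 (PySem.Set.empty, 0)
              d.insert p.1 (PySem.Set.add s.1 ((PySem.Dict.mk row).get? p.1), s.2 + 1)
            else d) d) d).getD c (PySem.Set.empty, 0)
    = if c ∈ schema.map Prod.fst then
        (PySem.Set.update (d.getD c (PySem.Set.empty, 0)).1
           ((rows.filter (fun row => (PySem.Dict.mk row).contains c)).map
             (fun row => (PySem.Dict.mk row).get? c)),
         (d.getD c (PySem.Set.empty, 0)).2 +
           ((rows.filter (fun row => (PySem.Dict.mk row).contains c)).map
             (fun row => (PySem.Dict.mk row).get? c)).length)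
      else d.getD c (PySem.Set.empty, 0) := by
  induction rows generalizing d with
  | nil => simp [PySem.Set.update]
  | cons r t ih =>
    simp only [List.foldl_cons]
    rw [ih, pv_stats_inner r schema hnd d c]
    by_cases hm : c ∈ List.map Prod.fst schema
    · by_cases hc : (PySem.Dict.mk r).contains c = true
      · rw [if_pos (⟨hm, hc⟩ : _ ∧ _), if_pos hm, if_pos hm]
        simp only [List.filter_cons, hc, if_true, List.map_cons, List.length_cons, Prod.mk.injEq]
        exact ⟨rfl, by omega⟩
      · simp only [Bool.not_eq_true] at hc
        rw [if_neg (fun (h : _ ∧ _) => (by cases (h.2.symm.trans hc)))]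
        simp only [List.filter_cons, hc, Bool.false_eq_true, if_false]
    · rw [if_neg (fun (h : _ ∧ _) => hm h.1), if_neg hm, if_neg hm]

-- ===== VERDICT (by name: the statement is the Claim_ definition above) =====
theorem validate_data_variety_py_spec : Claim_equal_validate_data_variety_py := by
  intro sd sch _ hpre
  obtain ⟨hsch, _hrows⟩ := hpre
  simp only [Spec_validate_data_variety_py, validate_data_variety_py, validate_data_variety_py_alt]
  by_cases hlen : sd.length < 3
  · rw [if_pos hlen, if_pos hlen]
  · rw [if_neg hlen, if_neg hlen]
    have hdup := pv_dup_rel sd PySem.Set.empty false []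
    simp only [Bool.false_eq_true, if_false, List.nil_append] at hdup
    rw [hdup]
    dsimp only
    refine PySem.List.foldl_congr_mem' _ _ _ _ ?_
    intro p hmem acc
    have hkey : p.1 ∈ List.map Prod.fst sch := List.mem_map_of_mem hmem
    have hs := pv_stats_outer sd sch hsch PySem.Dict.empty p.1
    rw [if_pos hkey] at hs
    have hofl : ∀ (l : List (Option String)),
        PySem.Set.update (PySem.Dict.getD PySem.Dict.empty p.1
          ((PySem.Set.empty : PySem.Set (Option String)), (0 : Nat))).1 l = PySem.Set.ofList l :=
      fun l => by simp [PySem.Dict.getD_empty, PySem.Set.update, PySem.Set.ofList_eq_foldl]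
    rw [hofl] at hs
    simp only [PySem.Dict.getD_empty, Nat.zero_add] at hs
    simp only [pvAltStats]
    rw [hs]
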